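-- pv_equiv track=rewrite | github.com/numb3rth30ry/Tower-Factorization-Prime-Number-Theorem | TowerPrimeNumberTheoremStatistics.py | factorize_with_spf
-- ===== SOURCE A (Python) =====
-- def factorize_with_spf(n, spf):
--     res = {}
--     while n > 1:
--         p = spf[n]
--         if p == 0 or p == 1:
--             res[n] = res.get(n,0) + 1
--             break
--         cnt = 0
--         while n % p == 0:
--             n //= p
--             cnt += 1
--         res[p] = cnt
--     return res
-- ===== SOURCE B (Python) =====
-- def factorize_with_spf(n, spf):
--     # Two-phase recursive strategy: first recursively collect the chain of
--     # spf steps (and the sentinel stop value, if hit), then count the chain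
--     # into a dict in a separate pass.
--     def path(n):
--         if n <= 1:
--             return [], None
--         p = spf[n]
--         if p == 0 or p == 1:
--             return [], n
--         rest, stop = path(n // p)
--         return [p] + rest, stop
--     factors, stop = path(n)
--     res = {}
--     for p in factors:
--         res[p] = res.get(p, 0) + 1
--     if stop is not None:
--         res[stop] = res.get(stop, 0) + 1
--     return res
-- ===== Notes on version B (the rewrite author's own statement) =====
-- stated objective: alternative
-- what changed: Replaced A's nested in-place dividing loops that write exponents into the dict as they go with a two-phase recursive algorithm: a recursion first collects the full chain of spf steps (plus the sentinel stop value), and a separate counting pass then builds the dict from that list.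
-- outside the precondition, e.g. on factorize_with_spf(12, [0, 0, 2, 3, 0, 0, 0, 0, 0, 0, 0, 0, 2]): A returns {2: 2, 3: 1}, B returns {2: 1, 6: 1}
import Mathlib
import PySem

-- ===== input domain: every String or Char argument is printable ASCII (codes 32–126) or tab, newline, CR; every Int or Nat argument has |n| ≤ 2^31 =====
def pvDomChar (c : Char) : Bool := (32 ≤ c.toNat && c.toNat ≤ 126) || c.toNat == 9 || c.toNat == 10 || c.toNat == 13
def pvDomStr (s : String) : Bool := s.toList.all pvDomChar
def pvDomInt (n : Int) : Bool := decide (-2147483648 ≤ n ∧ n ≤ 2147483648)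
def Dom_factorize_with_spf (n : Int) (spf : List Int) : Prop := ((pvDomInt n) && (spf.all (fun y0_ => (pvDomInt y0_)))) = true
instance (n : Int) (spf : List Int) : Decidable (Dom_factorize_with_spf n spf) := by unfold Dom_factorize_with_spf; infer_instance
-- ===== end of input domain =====

-- B replaces A's nested dividing loops (which write exponents into the dict as they go)
-- with a two-phase algorithm: a recursion collects the chain of spf steps and the sentinel
-- stop value, and a separate counting pass builds the dict; equal on valid tables (Pre_).

-- ===== PORT A =====
-- inner loop: `while n % p == 0: n //= p; cnt += 1` (fuel bounds the iterations; under
-- Pre_ the supplied fuel is proved sufficient, outside Pre_ the Python may not terminate)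
def spfInnerA (fuel : Nat) (n p cnt : Int) : Int × Int :=
  match fuel with
  | 0 => (n, cnt)
  | f + 1 =>
    if PySem.Int.mod n p = 0 then spfInnerA f (PySem.Int.floordiv n p) p (cnt + 1)
    else (n, cnt)

-- outer loop of A; `none` from pyGet? is Python's IndexError (excluded by Pre_)
def spfLoopA (fuel : Nat) (n : Int) (spf : List Int) (res : PySem.Dict Int Int) :
    PySem.Dict Int Int :=
  match fuel with
  | 0 => res
  | f + 1 =>
    if 1 < n then
      match PySem.List.pyGet? spf n with
      | none => res
      | some p =>
        if p = 0 ∨ p = 1 then res.insert n (res.getD n 0 + 1)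
        else
          let nc := spfInnerA (f + 1) n p 0
          spfLoopA f nc.1 spf (res.insert p nc.2)
    else res

def factorize_with_spf (n : Int) (spf : List Int) : List (Int × Int) :=
  (spfLoopA (n.toNat + 1) n spf PySem.Dict.empty).items

-- ===== PORT B =====
-- B's recursive `path`: the chain of spf values plus the optional sentinel stop value
-- (fuel bounds the recursion depth; sufficient under Pre_)
def spfPathB (fuel : Nat) (n : Int) (spf : List Int) : List Int × Option Int :=
  match fuel with
  | 0 => ([], none)
  | f + 1 =>
    if n ≤ 1 then ([], none)
    else
      match PySem.List.pyGet? spf n with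
      | none => ([], none)
      | some p =>
        if p = 0 ∨ p = 1 then ([], some n)
        else
          let r := spfPathB f (PySem.Int.floordiv n p) spf
          (p :: r.1, r.2)

-- B's counting pass: `for p in factors: res[p] = res.get(p,0) + 1`
def spfCountB (ps : List Int) (res : PySem.Dict Int Int) : PySem.Dict Int Int :=
  ps.foldl (fun r p => r.insert p (r.getD p 0 + 1)) res

def factorize_with_spf_alt (n : Int) (spf : List Int) : List (Int × Int) :=
  let fs := spfPathB (n.toNat + 1) n spf
  let res := spfCountB fs.1 PySem.Dict.empty
  (match fs.2 with
   | some s => res.insert s (res.getD s 0 + 1)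
   | none => res).items

-- ===== PRECONDITION & SPEC =====
-- entry i of a well-formed table: sentinel 0/1, or a factor p ≥ 2 of i such that the
-- table keeps answering p along the chain i, i/p, i/p², … while p still divides
abbrev goodEntry (spf : List Int) (i : Nat) : Prop :=
  spf.getD i 0 = 0 ∨ spf.getD i 0 = 1 ∨
    (2 ≤ spf.getD i 0 ∧ spf.getD i 0 ∣ (i : Int) ∧
      (spf.getD i 0 ∣ ((i : Int) / spf.getD i 0) →
        spf.getD (((i : Int) / spf.getD i 0)).toNat 0 = spf.getD i 0))

-- Pre_ excludes inputs with n ≥ len(spf) (A raises IndexError), tables whose relevant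
-- entries are neither sentinels nor chain-consistent divisors (A loops forever, or
-- returns a table-dependent value B has no reason to match), keeping exactly the
-- well-formed smallest-prime-factor tables the function is written for.
def Pre_factorize_with_spf (n : Int) (spf : List Int) : Prop :=
  n ≤ 1 ∨ (n.toNat < spf.length ∧ ∀ i : Nat, i ≤ n.toNat → 2 ≤ i → goodEntry spf i)

instance (n : Int) (spf : List Int) : Decidable (Pre_factorize_with_spf n spf) := by
  unfold Pre_factorize_with_spf; infer_instance

def pvWitness_factorize_with_spf : Int × List Int :=
  (12, [0, 0, 2, 3, 2, 5, 2, 7, 2, 3, 2, 11, 2])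

def Spec_factorize_with_spf (n : Int) (spf : List Int) (out : List (Int × Int)) : Prop :=
  out = factorize_with_spf_alt n spf
instance (n : Int) (spf : List Int) (out : List (Int × Int)) :
    Decidable (Spec_factorize_with_spf n spf out) := by
  unfold Spec_factorize_with_spf; infer_instance

-- ===== CLAIM (what is proved, stated in full; the proofs are below) =====
def Claim_equal_factorize_with_spf : Prop :=
  ∀ (n : Int) (spf : List Int), Dom_factorize_with_spf n spf →
    Pre_factorize_with_spf n spf →
    Spec_factorize_with_spf n spf (factorize_with_spf n spf)

-- ===== LEMMAS AND PROOFS =====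

-- assemble B's result from the path: count the factors, then apply the sentinel (if any)
def spfFinishB (res : PySem.Dict Int Int) (fs : List Int × Option Int) :
    PySem.Dict Int Int :=
  let r := spfCountB fs.1 res
  match fs.2 with
  | some s => r.insert s (r.getD s 0 + 1)
  | none => r

-- A's inner loop fully divides p out of n: n = p^e * m with p ∤ m
lemma spfInnerA_spec : ∀ (f : Nat) (n p c : Int), 2 ≤ p → 0 < n → n.toNat ≤ f →
    ∃ (e : Nat) (m : Int), n = p ^ e * m ∧ ¬ p ∣ m ∧ 0 < m ∧
      spfInnerA f n p c = (m, c + e) := by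
  intro f
  induction f with
  | zero => intro n p c hp hn hf; omega
  | succ f ih =>
    intro n p c hp hn hf
    by_cases hdvd : p ∣ n
    · obtain ⟨k, rfl⟩ := hdvd
      have hk : 0 < k := by nlinarith
      have hlt : k < p * k := by nlinarith
      obtain ⟨e, m, hkm, hm, hm0, heq⟩ := ih k p (c + 1) hp hk (by omega)
      refine ⟨e + 1, m, by rw [hkm]; ring, hm, hm0, ?_⟩
      have hmod : PySem.Int.mod (p * k) p = 0 :=
        (PySem.Int.mod_eq_zero_iff_dvd _ _).2 (Dvd.intro k rfl)
      have hdiv : PySem.Int.floordiv (p * k) p = k := by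
        rw [PySem.Int.floordiv_eq_ediv_of_pos (by omega)]
        exact Int.mul_ediv_cancel_left k (by omega)
      rw [spfInnerA, if_pos hmod, hdiv, heq]
      simp only [Prod.mk.injEq]
      exact ⟨trivial, by push_cast; ring⟩
    · refine ⟨0, n, by ring, hdvd, hn, ?_⟩
      simp [spfInnerA, PySem.Int.mod_eq_zero_iff_dvd, hdvd]

-- list indexing helper: xs[n] for a nonnegative in-range Int index, as getD
lemma pyGet_getD (spf : List Int) (n : Int) (h0 : 0 ≤ n) (hlt : n.toNat < spf.length) :
    PySem.List.pyGet? spf n = some (spf.getD n.toNat 0) := by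
  rw [PySem.List.pyGet?_of_nonneg spf h0, List.getElem?_eq_getElem hlt,
    List.getD_eq_getElem spf 0 hlt]

-- counting e copies of p on top of res[p] = c just raises the count to c + e
lemma spfCountB_replicate_insert : ∀ (e : Nat) (res : PySem.Dict Int Int) (p c : Int),
    spfCountB (List.replicate e p) (res.insert p c) = res.insert p (c + e) := by
  intro e
  induction e with
  | zero => intro res p c; simp [spfCountB]
  | succ e ih =>
    intro res p c
    rw [List.replicate_succ]
    show spfCountB (List.replicate e p)
      ((res.insert p c).insert p ((res.insert p c).getD p 0 + 1)) = _
    rw [PySem.Dict.getD_insert_self, PySem.Dict.insert_insert_self, ih]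
    congr 1
    push_cast; ring

lemma spfCountB_replicate (e : Nat) (res : PySem.Dict Int Int) (p : Int) (he : 1 ≤ e) :
    spfCountB (List.replicate e p) res = res.insert p (res.getD p 0 + e) := by
  obtain ⟨e', rfl⟩ : ∃ e', e = e' + 1 := ⟨e - 1, by omega⟩
  rw [List.replicate_succ]
  show spfCountB (List.replicate e' p) (res.insert p (res.getD p 0 + 1)) = _
  rw [spfCountB_replicate_insert]
  congr 1
  push_cast; ring

lemma spfCountB_append (xs ys : List Int) (res : PySem.Dict Int Int) :
    spfCountB (xs ++ ys) res = spfCountB ys (spfCountB xs res) := by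
  simp [spfCountB, List.foldl_append]

-- B's path over a full phase: e steps dividing by p, contributing e copies of p
lemma spfPathB_phase : ∀ (e : Nat) (spf : List Int) (N : Nat) (p m : Int),
    2 ≤ p → 0 < m →
    (∀ i : Nat, i ≤ N → 2 ≤ i → goodEntry spf i) → N < spf.length →
    ∀ (fb : Nat),
    (p ^ e * m).toNat ≤ N →
    (1 ≤ e → spf.getD (p ^ e * m).toNat 0 = p) →
    e ≤ fb →
    spfPathB fb (p ^ e * m) spf =
      (List.replicate e p ++ (spfPathB (fb - e) m spf).1, (spfPathB (fb - e) m spf).2) := by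
  intro e spf N p m hp hm0 hG hNlen
  induction e with
  | zero => intro fb _ _ _; norm_num
  | succ e ih =>
    intro fb hle hspf hfb
    have hpow : p ≤ p ^ (e + 1) := le_self_pow₀ (by omega) (by omega)
    have hn1 : ¬ p ^ (e + 1) * m ≤ 1 := by nlinarith
    have hn0 : (0 : Int) ≤ p ^ (e + 1) * m := by nlinarith
    obtain ⟨fb', rfl⟩ : ∃ fb', fb = fb' + 1 := ⟨fb - 1, by omega⟩
    have hnlt : (p ^ (e + 1) * m).toNat < spf.length := by omega
    have hget := pyGet_getD spf _ hn0 hnlt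
    have hsp : spf.getD (p ^ (e + 1) * m).toNat 0 = p := hspf (by omega)
    have hnot : ¬ (p = 0 ∨ p = 1) := by omega
    have hdiv : PySem.Int.floordiv (p ^ (e + 1) * m) p = p ^ e * m := by
      rw [PySem.Int.floordiv_eq_ediv_of_pos (by omega),
        show p ^ (e + 1) * m = p * (p ^ e * m) from by ring,
        Int.mul_ediv_cancel_left _ (by omega)]
    have hediv : (p ^ (e + 1) * m) / p = p ^ e * m := by
      rw [show p ^ (e + 1) * m = p * (p ^ e * m) from by ring,
        Int.mul_ediv_cancel_left _ (by omega)]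
    have hcast : (((p ^ (e + 1) * m).toNat : Int)) = p ^ (e + 1) * m :=
      Int.toNat_of_nonneg hn0
    have h2n : 2 ≤ (p ^ (e + 1) * m).toNat := by omega
    have hGn := hG _ hle h2n
    simp only [goodEntry, hsp, hcast] at hGn
    have hchain : p ∣ (p ^ (e + 1) * m) / p →
        spf.getD ((p ^ (e + 1) * m / p)).toNat 0 = p := by
      rcases hGn with h | h | h
      · omega
      · omega
      · exact h.2.2
    have hspf' : 1 ≤ e → spf.getD (p ^ e * m).toNat 0 = p := by
      intro he
      have hpd : p ∣ (p ^ (e + 1) * m) / p := by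
        rw [hediv]; exact dvd_mul_of_dvd_left (dvd_pow_self p (by omega)) m
      have := hchain hpd
      rwa [hediv] at this
    have hle' : (p ^ e * m).toNat ≤ N := by
      have h1 : p ^ e ≤ p ^ (e + 1) := pow_le_pow_right₀ (by omega) (by omega)
      have h2 : p ^ e * m ≤ p ^ (e + 1) * m := by nlinarith
      omega
    rw [spfPathB, if_neg hn1, hget]
    simp only [hsp, if_neg hnot, hdiv]
    rw [ih fb' hle' hspf' (by omega)]
    simp [List.replicate_succ, show fb' + 1 - (e + 1) = fb' - e from by omega]

-- main equivalence, by strong induction on a bound M for n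
lemma mainAB : ∀ (M : Nat) (n : Int) (spf : List Int) (N : Nat)
    (res : PySem.Dict Int Int) (fa fb : Nat),
    n.toNat ≤ M → n.toNat < fa → n.toNat < fb →
    (1 < n → n.toNat ≤ N) → N < spf.length →
    (∀ i : Nat, i ≤ N → 2 ≤ i → goodEntry spf i) →
    (∀ q, q ∈ res.keys → ¬ q ∣ n) →
    spfLoopA fa n spf res = spfFinishB res (spfPathB fb n spf) := by
  intro M
  induction M with
  | zero =>
    intro n spf N res fa fb hM hfa hfb hN hNlen hG hres
    obtain ⟨fa', rfl⟩ : ∃ k, fa = k + 1 := ⟨fa - 1, by omega⟩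
    obtain ⟨fb', rfl⟩ : ∃ k, fb = k + 1 := ⟨fb - 1, by omega⟩
    have hn : ¬ 1 < n := by omega
    rw [spfLoopA, spfPathB, if_neg hn, if_pos (by omega)]
    simp [spfFinishB, spfCountB]
  | succ M ih =>
    intro n spf N res fa fb hM hfa hfb hN hNlen hG hres
    obtain ⟨fa', rfl⟩ : ∃ k, fa = k + 1 := ⟨fa - 1, by omega⟩
    obtain ⟨fb', rfl⟩ : ∃ k, fb = k + 1 := ⟨fb - 1, by omega⟩
    by_cases hn : 1 < n
    · have h0n : (0 : Int) ≤ n := by omega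
      have hNle := hN hn
      have hnlt : n.toNat < spf.length := by omega
      have hget := pyGet_getD spf n h0n hnlt
      have hGn := hG n.toNat hNle (by omega)
      have hcast : ((n.toNat : Int)) = n := Int.toNat_of_nonneg h0n
      set p := spf.getD n.toNat 0 with hpdef
      rcases hGn with h0 | h1 | ⟨hp2, hpd, hchain⟩
      · have hp0 : p = 0 := hpdef.trans h0
        rw [spfLoopA, spfPathB, if_pos hn, if_neg (by omega), hget, hp0]
        simp [spfFinishB, spfCountB]
      · have hp1 : p = 1 := hpdef.trans h1
        rw [spfLoopA, spfPathB, if_pos hn, if_neg (by omega), hget, hp1]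
        simp [spfFinishB, spfCountB]
      · rw [hcast] at hpd hchain
        have hnot : ¬ (p = 0 ∨ p = 1) := by omega
        obtain ⟨e, m, hnm, hmnd, hm0, hinner⟩ :=
          spfInnerA_spec (fa' + 1) n p 0 hp2 (by omega) (by omega)
        have he1 : 1 ≤ e := by
          rcases Nat.eq_zero_or_pos e with he | he
          · exfalso; apply hmnd; rw [he, pow_zero, one_mul] at hnm; rw [← hnm]; exact hpd
          · exact he
        have hpk : res.contains p = false := by
          cases hcp : res.contains p
          · rfl
          · exact absurd hpd (hres p ((PySem.Dict.contains_iff_mem_keys res p).1 hcp))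
        have hg0 : res.getD p 0 = 0 := PySem.Dict.getD_of_not_contains res 0 hpk
        -- n is large enough: m + e ≤ n
        obtain ⟨e', rfl⟩ : ∃ e', e = e' + 1 := ⟨e - 1, by omega⟩
        have h2p : ((e' : Int) + 2) ≤ 2 ^ (e' + 1) := by
          exact_mod_cast Nat.succ_le_of_lt (Nat.lt_two_pow_self (n := e' + 1))
        have hp2p : (2 : Int) ^ (e' + 1) ≤ p ^ (e' + 1) := pow_le_pow_left₀ (by omega) hp2 _
        have hkey : m + ((e' : Int) + 1) ≤ n := by rw [hnm]; nlinarith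
        have hmlen : m ≤ n := by rw [hnm]; nlinarith
        -- chain condition for the phase lemma
        have hspf0 : 1 ≤ e' + 1 → spf.getD (p ^ (e' + 1) * m).toNat 0 = p := by
          intro _; rw [← hnm]
        have hleN : (p ^ (e' + 1) * m).toNat ≤ N := by rw [← hnm]; omega
        -- B's path at n: e copies of p, then the path at m
        have hpath := spfPathB_phase (e' + 1) spf N p m hp2 hm0 hG hNlen (fb' + 1)
          hleN hspf0 (by omega)
        rw [← hnm] at hpath
        -- A: one outer step
        rw [spfLoopA, if_pos hn, hget]
        simp only [if_neg hnot, hinner]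
        -- B: finish after the phase
        rw [hpath]
        unfold spfFinishB
        simp only
        rw [spfCountB_append, spfCountB_replicate _ _ _ (by omega), hg0]
        have hrec := ih m spf N (res.insert p (0 + ((e' + 1 : Nat) : Int))) fa'
          (fb' + 1 - (e' + 1)) (by omega) (by omega) (by omega)
          (fun _ => by omega) hNlen hG ?_
        · rw [hrec]; rfl
        · intro q hq
          rcases (PySem.Dict.mem_keys_insert res p q _).1 hq with rfl | hq'
          · exact hmnd
          · intro hdm
            exact hres q hq' (by rw [hnm]; exact Dvd.dvd.mul_left hdm _)
    · rw [spfLoopA, spfPathB, if_neg hn, if_pos (by omega)]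
      simp [spfFinishB, spfCountB]

-- ===== VERDICT (by name: the statement is the Claim_ definition above) =====
theorem factorize_with_spf_spec : Claim_equal_factorize_with_spf := by
  intro n spf _ hpre
  unfold Spec_factorize_with_spf factorize_with_spf factorize_with_spf_alt
  rcases hpre with hn | ⟨hlen, hG⟩
  · have h : ¬ 1 < n := by omega
    rw [spfLoopA, spfPathB, if_neg h, if_pos (by omega)]
    rfl
  · rw [mainAB n.toNat n spf n.toNat PySem.Dict.empty (n.toNat + 1) (n.toNat + 1)
      le_rfl (by omega) (by omega) (fun _ => le_rfl) hlen hG ?_]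
    · rfl
    · intro q hq
      simp [PySem.Dict.keys_empty] at hq
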